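-- pv_equiv track=rewrite | github.com/hanukathas/CodingRevisions | cses/basics/trie_prefix.py | autocomplete
-- ===== SOURCE A (Python) =====
-- from typing import List
--
-- class TrieNode:
--     def __init__(self):
--         # children[0] is for '0', children[1] is for '1'
--         self.children = [None, None]
--         # last stores the most recent command index passing here
--         self.last = -1
--
-- def autocomplete(commands: List[str]) -> List[int]:
--     # Initialize the Trie root and the answer list
--     root = TrieNode()
--     result: List[int] = []
--
--     # Process each command in order
--     for j, cmd in enumerate(commands):
--         if j == 0:
--             # First command has no previous commands
--             result.append(0)
--         else:
--             node = root
--             best_idx = -1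
--             matched = False
--             # Search for the longest prefix in the Trie
--             for ch in cmd:
--                 bit = 0 if ch == '0' else 1
--                 # If the child exists, we can extend the prefix
--                 if node.children[bit]:
--                     node = node.children[bit]
--                     matched = True
--                     # node.last is the most recent command with this prefix
--                     best_idx = node.last
--                 else:
--                     break
--             # If we matched at least one character, use best_idx
--             # Otherwise fall back to the immediately previous command
--             result.append(best_idx if matched else j - 1)
--
--         # Insert/update the full command into the Trie
--         node = root
--         for ch in cmd:
--             bit = 0 if ch == '0' else 1
--             if not node.children[bit]:
--                 node.children[bit] = TrieNode()
--             node = node.children[bit]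
--             # mark this node with the current command index
--             node.last = j
--
--     return result
-- ===== SOURCE B (Python) =====
-- from typing import List
--
-- def lcp_bits(a: str, b: str) -> int:
--     # longest common prefix length under the bit mapping '0' -> 0, anything else -> 1
--     l = 0
--     while l < len(a) and l < len(b) and (a[l] == '0') == (b[l] == '0'):
--         l += 1
--     return l
--
-- def autocomplete(commands: List[str]) -> List[int]:
--     result: List[int] = []
--     seen: List[str] = []
--     for j, cmd in enumerate(commands):
--         if j == 0:
--             result.append(0)
--         else:
--             best_len = 0
--             best_idx = j - 1
--             i = 0
--             for prev in seen:
--                 l = lcp_bits(prev, cmd)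
--                 if l >= 1 and l >= best_len:
--                     best_len, best_idx = l, i
--                 i += 1
--             result.append(best_idx)
--         seen.append(cmd)
--     return result
-- ===== Notes on version B (the rewrite author's own statement) =====
-- stated objective: simpler
-- what changed: Replaced the mutable binary trie (build + longest-prefix walk with per-node most-recent index) by a direct pairwise scan: for each command, compute the bit-mapped longest common prefix with every earlier command and keep the most recent index achieving the maximal nonzero length, falling back to j-1.
import Mathlib
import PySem

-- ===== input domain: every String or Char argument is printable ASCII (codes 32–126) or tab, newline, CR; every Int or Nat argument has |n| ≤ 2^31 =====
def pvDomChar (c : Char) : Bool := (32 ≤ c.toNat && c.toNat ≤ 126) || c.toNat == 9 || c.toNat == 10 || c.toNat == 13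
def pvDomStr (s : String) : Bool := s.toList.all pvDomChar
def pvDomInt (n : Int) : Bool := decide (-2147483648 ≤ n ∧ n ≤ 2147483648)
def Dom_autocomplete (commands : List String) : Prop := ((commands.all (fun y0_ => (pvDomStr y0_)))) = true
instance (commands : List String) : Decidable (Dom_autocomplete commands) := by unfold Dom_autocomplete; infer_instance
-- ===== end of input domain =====

-- B replaces A's mutable binary trie by a direct pairwise longest-common-prefix
-- scan over the previous commands (simpler: no tree structure, two short loops).

-- ===== PORT A =====
-- TrieNode with children[0]/children[1] (`nil` = Python None) and `last`.
inductive Trie where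
  | nil : Trie
  | node : Trie → Trie → Int → Trie
deriving DecidableEq, Repr

-- node.children[bit]  (bit as Bool: false = '0', true = else; nil = None)
def Trie.child : Trie → Bool → Trie
  | .nil, _ => .nil
  | .node c0 _ _, false => c0
  | .node _ c1 _, true => c1

-- node.children[bit] = x
def Trie.setChild : Trie → Bool → Trie → Trie
  | .nil, _, _ => .nil
  | .node _ c1 l, false, x => .node x c1 l
  | .node c0 _ l, true, x => .node c0 x l

-- node.last
def Trie.last : Trie → Int
  | .nil => -1
  | .node _ _ l => l

-- node.last = j
def Trie.setLast : Trie → Int → Trie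
  | .nil, _ => .nil
  | .node c0 c1 _, j => .node c0 c1 j

-- `node.children[bit] = TrieNode()` when missing, else keep it
def Trie.orNew : Trie → Trie
  | .nil => .node .nil .nil (-1)
  | t => t

-- A's search loop: `for ch in cmd: …` threading (node, best_idx, matched); break = return
def searchA : Trie → List Char → Int → Bool → Int × Bool
  | _, [], best, matched => (best, matched)
  | t, c :: cs, best, matched =>
      let ch := t.child (c != '0')
      if ch = .nil then (best, matched)        -- break
      else searchA ch cs ch.last true

-- A's insert loop: `for ch in cmd: …` (create missing child, set last := j, descend)
def insertA : Trie → List Char → Int → Trie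
  | t, [], _ => t
  | t, c :: cs, j =>
      let b : Bool := c != '0'
      let ch := (t.child b).orNew
      t.setChild b (insertA (ch.setLast j) cs j)

-- A's outer loop over `enumerate(commands)`, threading (root, j), appending results
def autoLoopA : List String → Trie → Int → List Int
  | [], _, _ => []
  | cmd :: rest, root, j =>
      let r : Int :=
        if j = 0 then 0
        else
          let (best, matched) := searchA root cmd.toList (-1) false
          if matched then best else j - 1
      r :: autoLoopA rest (insertA root cmd.toList j) (j + 1)

def autocomplete (commands : List String) : List Int :=
  autoLoopA commands (Trie.node .nil .nil (-1)) 0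

-- ===== PORT B =====
-- lcp_bits: longest common prefix under the mapping '0' ↦ 0, anything else ↦ 1
def lcpBits : List Char → List Char → Nat
  | a :: as_, b :: bs => if (a == '0') = (b == '0') then lcpBits as_ bs + 1 else 0
  | _, _ => 0

-- B's inner loop `for prev in seen`, threading (i, best_len, best_idx)
def bestScan : List String → List Char → Int → Nat → Int → Int
  | [], _, _, _, bidx => bidx
  | p :: ps, cmd, i, blen, bidx =>
      let l := lcpBits p.toList cmd
      if 1 ≤ l ∧ blen ≤ l then bestScan ps cmd (i + 1) l i
      else bestScan ps cmd (i + 1) blen bidx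

-- B's outer loop, threading (seen, j)
def autoLoopB : List String → List String → Int → List Int
  | [], _, _ => []
  | cmd :: rest, seen, j =>
      let r : Int := if j = 0 then 0 else bestScan seen cmd.toList 0 0 (j - 1)
      r :: autoLoopB rest (seen ++ [cmd]) (j + 1)

def autocomplete_alt (commands : List String) : List Int :=
  autoLoopB commands [] 0

-- ===== PRECONDITION & SPEC =====
def Spec_autocomplete (commands : List String) (out : List Int) : Prop := out = autocomplete_alt commands
instance (commands : List String) (out : List Int) : Decidable (Spec_autocomplete commands out) := by unfold Spec_autocomplete; infer_instance

-- ===== CLAIM (what is proved, stated in full; the proofs are below) =====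
def Claim_equal_autocomplete : Prop := ∀ (commands : List String), Dom_autocomplete commands → Spec_autocomplete commands (autocomplete commands)

-- ===== LEMMAS AND PROOFS =====

-- depth the search loop reaches in trie t on query q
def reach : Trie → List Char → Nat
  | _, [] => 0
  | t, c :: cs =>
      let ch := t.child (c != '0')
      if ch = .nil then 0 else reach ch cs + 1

-- proof-side version of bestScan that also returns the final best_len
def scan2 : List String → List Char → Int → Nat → Int → Nat × Int
  | [], _, _, blen, bidx => (blen, bidx)
  | p :: ps, cmd, i, blen, bidx =>
      let l := lcpBits p.toList cmd
      if 1 ≤ l ∧ blen ≤ l then scan2 ps cmd (i + 1) l i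
      else scan2 ps cmd (i + 1) blen bidx

-- insert the list of commands with consecutive indices starting at i
def insMany : Trie → List String → Int → Trie
  | t, [], _ => t
  | t, p :: ps, i => insMany (insertA t p.toList i) ps (i + 1)

theorem scan2_snd (ps : List String) (q : List Char) (i : Int) (blen : Nat) (bidx : Int) :
    (scan2 ps q i blen bidx).2 = bestScan ps q i blen bidx := by
  induction ps generalizing i blen bidx with
  | nil => rfl
  | cons p ps ih =>
      simp only [scan2, bestScan]
      split_ifs <;> apply ih

theorem scan2_fst_le (ps : List String) (q : List Char) (i : Int) (blen : Nat) (bidx : Int) :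
    blen ≤ (scan2 ps q i blen bidx).1 := by
  induction ps generalizing i blen bidx with
  | nil => simp [scan2]
  | cons p ps ih =>
      simp only [scan2]
      split_ifs with h
      · exact le_trans h.2 (ih ..)
      · exact ih ..

theorem scan2_zero (ps : List String) (q : List Char) (i : Int) (blen : Nat) (bidx : Int)
    (h : (scan2 ps q i blen bidx).1 = 0) : scan2 ps q i blen bidx = (blen, bidx) := by
  induction ps generalizing i blen bidx with
  | nil => rfl
  | cons p ps ih =>
      simp only [scan2] at h ⊢
      split_ifs at h ⊢ with hc
      · have := scan2_fst_le ps q (i + 1) (lcpBits p.toList q) i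
        omega
      · exact ih _ _ _ h

theorem lcpBits_cons_pos (a c : Char) (as_ cs : List Char) (h : (a != '0') = (c != '0')) :
    lcpBits (a :: as_) (c :: cs) = lcpBits as_ cs + 1 := by
  have : (a == '0') = (c == '0') := by
    cases ha : a == '0' <;> cases hc : c == '0' <;> simp_all [bne]
  simp [lcpBits, this]

theorem lcpBits_cons_neg (a c : Char) (as_ cs : List Char) (h : ¬ (a != '0') = (c != '0')) :
    lcpBits (a :: as_) (c :: cs) = 0 := by
  have : ¬ (a == '0') = (c == '0') := by
    cases ha : a == '0' <;> cases hc : c == '0' <;> simp_all [bne]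
  simp [lcpBits, this]

theorem setLast_child (t : Trie) (j : Int) (b : Bool) : (t.setLast j).child b = t.child b := by
  cases t <;> cases b <;> rfl

theorem setChild_child (c0 c1 : Trie) (l : Int) (b b' : Bool) (x : Trie) :
    ((Trie.node c0 c1 l).setChild b x).child b' =
      if b = b' then x else (Trie.node c0 c1 l).child b' := by
  cases b <;> cases b' <;> simp [Trie.setChild, Trie.child]

theorem setChild_ne_nil (c0 c1 : Trie) (l : Int) (b : Bool) (x : Trie) :
    (Trie.node c0 c1 l).setChild b x ≠ Trie.nil := by
  cases b <;> simp [Trie.setChild]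

theorem setChild_last (c0 c1 : Trie) (l : Int) (b : Bool) (x : Trie) :
    ((Trie.node c0 c1 l).setChild b x).last = l := by
  cases b <;> rfl

theorem insertA_ne_nil (p : List Char) (t : Trie) (j : Int) (ht : t ≠ .nil) :
    insertA t p j ≠ .nil := by
  cases p with
  | nil => exact ht
  | cons c cs =>
      cases t with
      | nil => exact absurd rfl ht
      | node c0 c1 l =>
          simp only [insertA]
          exact setChild_ne_nil c0 c1 l _ _

theorem insertA_last (p : List Char) (c0 c1 : Trie) (l j : Int) :
    (insertA (Trie.node c0 c1 l) p j).last = l := by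
  cases p with
  | nil => rfl
  | cons c cs =>
      simp only [insertA]
      exact setChild_last ..

-- search returns its accumulator untouched when it cannot take even the first step
theorem searchA_reach_zero (q : List Char) (t : Trie) (best : Int) (m : Bool)
    (h : reach t q = 0) : searchA t q best m = (best, m) := by
  cases q with
  | nil => rfl
  | cons c cs =>
      simp only [reach] at h
      simp only [searchA]
      by_cases hc : t.child (c != '0') = .nil
      · rw [if_pos hc]
      · rw [if_neg hc] at h ⊢
        omega

-- setLast changes no child, hence search and reach ignore it
theorem searchA_setLast (q : List Char) (t : Trie) (j best : Int) (m : Bool) :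
    searchA (t.setLast j) q best m = searchA t q best m := by
  cases q with
  | nil => rfl
  | cons c cs => simp only [searchA, setLast_child]

theorem reach_setLast (q : List Char) (t : Trie) (j : Int) :
    reach (t.setLast j) q = reach t q := by
  cases q with
  | nil => rfl
  | cons c cs => simp only [reach, setLast_child]

-- once the search takes a step, the accumulator is overwritten
theorem searchA_acc (q : List Char) (t : Trie) (b b' : Int) (m m' : Bool)
    (h : 1 ≤ reach t q) : searchA t q b m = searchA t q b' m' := by
  cases q with
  | nil => simp [reach] at h
  | cons c cs =>
      simp only [reach] at h
      simp only [searchA]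
      split_ifs at h ⊢ with hc
      · omega
      · rfl

-- search in a trie holding exactly one path, all of whose nodes carry last = j
theorem searchA_single (cs : List Char) (as_ : List Char) (j L : Int) :
    searchA (insertA (Trie.node .nil .nil L) as_ j) cs j true = (j, true) := by
  induction cs generalizing as_ L with
  | nil => rfl
  | cons c cs ih =>
      cases as_ with
      | nil =>
          simp only [insertA, searchA]
          rw [show (Trie.node .nil .nil L).child (c != '0') = .nil by
              cases c != '0' <;> rfl]
          simp
      | cons a as_ =>
          simp only [insertA, searchA]
          rw [show (Trie.node .nil .nil L).child (a != '0') = .nil by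
              cases a != '0' <;> rfl]
          rw [setChild_child]
          by_cases hb : (a != '0') = (c != '0')
          · rw [if_pos hb]
            have hX : insertA ((Trie.orNew .nil).setLast j) as_ j
                = insertA (Trie.node .nil .nil j) as_ j := rfl
            rw [hX]
            have hne := insertA_ne_nil as_ (Trie.node .nil .nil j) j (by simp)
            rw [if_neg hne, insertA_last]
            exact ih as_ j
          · rw [if_neg hb]
            rw [show (Trie.node .nil .nil L).child (c != '0') = .nil by
                cases c != '0' <;> rfl]
            simp

theorem reach_single (cs : List Char) (as_ : List Char) (j L : Int) :
    reach (insertA (Trie.node .nil .nil L) as_ j) cs = lcpBits as_ cs := by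
  induction cs generalizing as_ L with
  | nil => cases as_ <;> rfl
  | cons c cs ih =>
      cases as_ with
      | nil =>
          simp only [insertA, reach, lcpBits]
          rw [show (Trie.node .nil .nil L).child (c != '0') = .nil by
              cases c != '0' <;> rfl]
          simp
      | cons a as_ =>
          simp only [insertA, reach]
          rw [show (Trie.node .nil .nil L).child (a != '0') = .nil by
              cases a != '0' <;> rfl]
          rw [setChild_child]
          by_cases hb : (a != '0') = (c != '0')
          · rw [if_pos hb, lcpBits_cons_pos a c as_ cs hb]
            have hX : insertA ((Trie.orNew .nil).setLast j) as_ j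
                = insertA (Trie.node .nil .nil j) as_ j := rfl
            rw [hX]
            have hne := insertA_ne_nil as_ (Trie.node .nil .nil j) j (by simp)
            rw [if_neg hne, ih as_ j]
          · rw [if_neg hb, lcpBits_cons_neg a c as_ cs hb]
            rw [show (Trie.node .nil .nil L).child (c != '0') = .nil by
                cases c != '0' <;> rfl]
            simp

-- key step lemma (1): inserting p extends the reachable depth on q to max with the lcp
theorem reach_insert (q : List Char) (p : List Char) (t : Trie) (j : Int) (ht : t ≠ .nil) :
    reach (insertA t p j) q = max (reach t q) (lcpBits p q) := by
  induction q generalizing p t with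
  | nil => cases p <;> simp [reach, lcpBits]
  | cons c cs ih =>
      cases p with
      | nil => simp [insertA, lcpBits]
      | cons a as_ =>
          cases t with
          | nil => exact absurd rfl ht
          | node c0 c1 l =>
            simp only [insertA, reach]
            rw [setChild_child]
            by_cases hb : (a != '0') = (c != '0')
            · rw [if_pos hb, lcpBits_cons_pos a c as_ cs hb]
              cases hch : (Trie.node c0 c1 l).child (a != '0') with
              | nil =>
                  have hX : insertA ((Trie.orNew .nil).setLast j) as_ j
                      = insertA (Trie.node .nil .nil j) as_ j := rfl
                  rw [hX]
                  have hne := insertA_ne_nil as_ (Trie.node .nil .nil j) j (by simp)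
                  rw [if_neg hne, reach_single]
                  rw [hb] at hch
                  rw [hch, if_pos rfl]
                  omega
              | node d0 d1 dl =>
                  have hX : insertA ((Trie.orNew (Trie.node d0 d1 dl)).setLast j) as_ j
                      = insertA (Trie.node d0 d1 j) as_ j := rfl
                  rw [hX]
                  have hne := insertA_ne_nil as_ (Trie.node d0 d1 j) j (by simp)
                  rw [if_neg hne, ih as_ (Trie.node d0 d1 j) (by simp)]
                  have hrs : reach (Trie.node d0 d1 j) cs = reach (Trie.node d0 d1 dl) cs := by
                    have := reach_setLast cs (Trie.node d0 d1 dl) j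
                    simpa [Trie.setLast] using this
                  rw [hrs]
                  rw [hb] at hch
                  rw [hch, if_neg (by simp)]
                  omega
            · rw [if_neg hb, lcpBits_cons_neg a c as_ cs hb]
              simp

-- key step lemma (2): how one insertion changes the search result
theorem searchA_insert (q : List Char) (p : List Char) (t : Trie) (j best : Int) (m : Bool)
    (ht : t ≠ .nil) :
    searchA (insertA t p j) q best m =
      if 1 ≤ lcpBits p q ∧ reach t q ≤ lcpBits p q then (j, true)
      else searchA t q best m := by
  induction q generalizing p t best m with
  | nil => cases p <;> simp [searchA, lcpBits]
  | cons c cs ih =>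
      cases p with
      | nil => simp [insertA, lcpBits]
      | cons a as_ =>
          cases t with
          | nil => exact absurd rfl ht
          | node c0 c1 l =>
            by_cases hb : (a != '0') = (c != '0')
            · rw [lcpBits_cons_pos a c as_ cs hb]
              simp only [insertA, searchA, reach]
              rw [setChild_child, if_pos hb]
              cases hch : (Trie.node c0 c1 l).child (a != '0') with
              | nil =>
                  have hX : insertA ((Trie.orNew .nil).setLast j) as_ j
                      = insertA (Trie.node .nil .nil j) as_ j := rfl
                  rw [hX]
                  have hne := insertA_ne_nil as_ (Trie.node .nil .nil j) j (by simp)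
                  rw [if_neg hne, insertA_last, searchA_single]
                  rw [hb] at hch
                  rw [hch, if_pos rfl]
                  rw [if_pos (by omega)]
              | node d0 d1 dl =>
                  rw [hb] at hch
                  rw [hch]
                  have hdn : (Trie.node d0 d1 dl : Trie) ≠ Trie.nil := by simp
                  rw [if_neg hdn, if_neg hdn]
                  have hX : insertA ((Trie.orNew (Trie.node d0 d1 dl)).setLast j) as_ j
                      = insertA (Trie.node d0 d1 j) as_ j := rfl
                  rw [hX]
                  have hne := insertA_ne_nil as_ (Trie.node d0 d1 j) j (by simp)
                  rw [if_neg hne, insertA_last]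
                  rw [ih as_ (Trie.node d0 d1 j) j true (by simp)]
                  have hrs : reach (Trie.node d0 d1 j) cs = reach (Trie.node d0 d1 dl) cs := by
                    have := reach_setLast cs (Trie.node d0 d1 dl) j
                    simpa [Trie.setLast] using this
                  rw [hrs]
                  simp only [Trie.last]
                  have hsl : searchA (Trie.node d0 d1 j) cs j true
                      = searchA (Trie.node d0 d1 dl) cs j true := by
                    have := searchA_setLast cs (Trie.node d0 d1 dl) j j true
                    simpa [Trie.setLast] using this
                  rw [hsl]
                  by_cases h1 : 1 ≤ lcpBits as_ cs ∧ reach (Trie.node d0 d1 dl) cs ≤ lcpBits as_ cs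
                  · rw [if_pos h1, if_pos (show 1 ≤ lcpBits as_ cs + 1 ∧ reach (Trie.node d0 d1 dl) cs + 1 ≤ lcpBits as_ cs + 1 by omega)]
                  · rw [if_neg h1]
                    by_cases hz : reach (Trie.node d0 d1 dl) cs = 0
                    · have hl0 : lcpBits as_ cs = 0 := by omega
                      rw [if_pos (show 1 ≤ lcpBits as_ cs + 1 ∧ reach (Trie.node d0 d1 dl) cs + 1 ≤ lcpBits as_ cs + 1 by omega)]
                      rw [searchA_reach_zero cs _ j true hz]
                    · rw [if_neg (show ¬ (1 ≤ lcpBits as_ cs + 1 ∧ reach (Trie.node d0 d1 dl) cs + 1 ≤ lcpBits as_ cs + 1) by omega)]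
                      exact searchA_acc cs _ j dl true true (by omega)
            · rw [lcpBits_cons_neg a c as_ cs hb]
              simp only [insertA, searchA]
              rw [setChild_child, if_neg hb]
              simp

-- the scan step lemma joining B's fold to the evolving trie
theorem scanStep (seen : List String) (q : List Char) (t : Trie) (i : Int)
    (blen : Nat) (bidx : Int) (ht : t ≠ .nil)
    (h1 : reach t q = blen)
    (h2 : 1 ≤ blen → ∀ b m, searchA t q b m = (bidx, true)) :
    reach (insMany t seen i) q = (scan2 seen q i blen bidx).1 ∧
    (1 ≤ (scan2 seen q i blen bidx).1 →
      ∀ b m, searchA (insMany t seen i) q b m = ((scan2 seen q i blen bidx).2, true)) := by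
  induction seen generalizing t i blen bidx with
  | nil => exact ⟨h1, fun h b m => h2 h b m⟩
  | cons p ps ih =>
      simp only [insMany, scan2]
      by_cases hc : 1 ≤ lcpBits p.toList q ∧ blen ≤ lcpBits p.toList q
      · rw [if_pos hc]
        apply ih (insertA t p.toList i) (i + 1) (lcpBits p.toList q) i
          (insertA_ne_nil _ _ _ ht)
        · rw [reach_insert _ _ _ _ ht, h1]; omega
        · intro _ b m
          rw [searchA_insert _ _ _ _ _ _ ht, h1, if_pos hc]
      · rw [if_neg hc]
        apply ih (insertA t p.toList i) (i + 1) blen bidx (insertA_ne_nil _ _ _ ht)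
        · rw [reach_insert _ _ _ _ ht, h1]; omega
        · intro hb b m
          rw [searchA_insert _ _ _ _ _ _ ht, h1, if_neg hc]
          exact h2 hb b m

theorem reach_root (q : List Char) (L : Int) : reach (Trie.node .nil .nil L) q = 0 := by
  cases q with
  | nil => rfl
  | cons c cs =>
      simp only [reach]
      rw [show (Trie.node .nil .nil L).child (c != '0') = .nil by
          cases c != '0' <;> rfl]
      simp

theorem insMany_append (t : Trie) (seen : List String) (cmd : String) (i : Int) :
    insMany t (seen ++ [cmd]) i = insertA (insMany t seen i) cmd.toList (i + seen.length) := by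
  induction seen generalizing t i with
  | nil => simp [insMany]
  | cons p ps ih =>
      simp only [List.cons_append, insMany, ih]
      congr 1
      simp only [List.length_cons]
      push_cast
      omega

-- main loop correspondence
theorem loop_eq (rest : List String) (seen : List String) :
    autoLoopA rest (insMany (Trie.node .nil .nil (-1)) seen 0) (seen.length : Int)
      = autoLoopB rest seen (seen.length : Int) := by
  induction rest generalizing seen with
  | nil => rfl
  | cons cmd rest ih =>
      simp only [autoLoopA, autoLoopB]
      have hroot : (Trie.node Trie.nil Trie.nil (-1) : Trie) ≠ .nil := by simp
      have hstep := scanStep seen cmd.toList (Trie.node .nil .nil (-1)) 0 0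
        ((seen.length : Int) - 1) hroot (reach_root _ _) (fun h => absurd h (by omega))
      have htail : autoLoopA rest (insertA (insMany (Trie.node .nil .nil (-1)) seen 0)
            cmd.toList ((seen.length : Int))) ((seen.length : Int) + 1)
          = autoLoopB rest (seen ++ [cmd]) ((seen.length : Int) + 1) := by
        have h0 := ih (seen ++ [cmd])
        rw [insMany_append] at h0
        simpa using h0
      rw [htail]
      congr 1
      by_cases hj : (seen.length : Int) = 0
      · rw [if_pos hj, if_pos hj]
      · rw [if_neg hj, if_neg hj]
        rcases hstep with ⟨hre, hse⟩
        by_cases hz : (scan2 seen cmd.toList 0 0 ((seen.length : Int) - 1)).1 = 0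
        · rw [searchA_reach_zero cmd.toList
            (insMany (Trie.node .nil .nil (-1)) seen 0) (-1) false (by rw [hre]; exact hz)]
          have h0 := scan2_zero seen cmd.toList 0 0 ((seen.length : Int) - 1) hz
          rw [← scan2_snd, h0]
          simp
        · rw [hse (by omega) (-1) false]
          rw [← scan2_snd]
          simp

-- ===== VERDICT (by name: the statement is the Claim_ definition above) =====
theorem autocomplete_spec : Claim_equal_autocomplete := by
  intro commands _
  unfold Spec_autocomplete autocomplete autocomplete_alt
  have := loop_eq commands []
  simpa [insMany] using this
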